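-- pv_equiv track=rewrite | github.com/bu-bu-xxx/leetcode-python-code | 其他-含每日一题4/Q1765. 地图中的最高点/answer1.py | highestPeak
-- ===== SOURCE A (Python) =====
-- from typing import List
--
-- def highestPeak(isWater: List[List[int]]) -> List[List[int]]:
--     queue = [(-1,-1)]
--     m, n = len(isWater), len(isWater[0])
--     height = [[-1]*n for _ in range(m)]
--
--     def neighbors(node:tuple)->List[tuple]:
--         if node == (-1,-1):
--             ret = []
--             for i in range(m):
--                 for j in range(n):
--                     if isWater[i][j] == 1:
--                         ret.append((i,j))
--         else:
--             ret = []
--             if node[0]-1>=0: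
--                 ret.append((node[0]-1,node[1]))
--             if node[0]+1 <m:
--                 ret.append((node[0]+1,node[1]))
--             if node[1] -1>=0:
--                 ret.append((node[0],node[1]-1))
--             if node[1]+1<n:
--                 ret.append((node[0],node[1]+1))
--         return ret
--
--     h_tmp = 0
--     while queue:
--         for _ in range(len(queue)):
--             node_tmp = queue.pop(0)
--             for neighbor in neighbors(node_tmp):
--                 if height[neighbor[0]][neighbor[1]] == -1:
--                     height[neighbor[0]][neighbor[1]] = h_tmp
--                     queue.append(neighbor)
--         h_tmp += 1
--
--     return height
-- ===== SOURCE B (Python) =====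
-- def highestPeak(isWater):
--     m, n = len(isWater), len(isWater[0])
--     water = [(i, j) for i in range(m) for j in range(n) if isWater[i][j] == 1]
--     if not water:
--         return [[-1] * n for _ in range(m)]
--     return [[min(abs(i - a) + abs(j - b) for a, b in water) for j in range(n)]
--             for i in range(m)]
-- ===== Notes on version B (the rewrite author's own statement) =====
-- stated objective: alternative
-- what changed: Replaces the multi-source BFS with an explicit FIFO queue by a direct computation: collect the water cells once and return, for every cell, the minimum Manhattan distance to a water cell (all -1 when there is no water), which is exactly what the BFS levels compute on an obstacle-free grid.
import Mathlib
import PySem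

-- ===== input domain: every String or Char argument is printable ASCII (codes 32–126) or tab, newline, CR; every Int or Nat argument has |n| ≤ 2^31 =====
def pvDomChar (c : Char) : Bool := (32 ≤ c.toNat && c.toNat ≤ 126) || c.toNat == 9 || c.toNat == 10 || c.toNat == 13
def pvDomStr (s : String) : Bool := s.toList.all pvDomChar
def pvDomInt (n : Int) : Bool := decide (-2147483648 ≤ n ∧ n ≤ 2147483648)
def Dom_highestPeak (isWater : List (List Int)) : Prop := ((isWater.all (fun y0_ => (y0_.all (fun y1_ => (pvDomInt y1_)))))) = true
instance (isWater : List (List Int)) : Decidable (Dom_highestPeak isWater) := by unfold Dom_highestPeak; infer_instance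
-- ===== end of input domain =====

-- B replaces A's multi-source BFS (FIFO queue, levels) by a direct computation of each cell's
-- minimum Manhattan distance to a water cell (all -1 when no water); alternative algorithm, same values.


-- ===== PORT A =====
-- height[x][y]  (defaults are never reached on inputs admitted by Pre_: all accesses are in range)
def pvMget (hgt : List (List Int)) (x y : Int) : Int :=
  PySem.List.pyGetD (PySem.List.pyGetD hgt x []) y 0

-- height[x][y] = v
def pvMset (hgt : List (List Int)) (x y v : Int) : List (List Int) :=
  PySem.List.pySetD hgt x (PySem.List.pySetD (PySem.List.pyGetD hgt x []) y v)

-- A's nested function `neighbors`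
def pvNeighbors (isWater : List (List Int)) (m n : Int) (node : Int × Int) : List (Int × Int) :=
  if node = (-1, -1) then
    (PySem.List.pyRange 0 m 1).foldl (fun ret i =>
      (PySem.List.pyRange 0 n 1).foldl (fun ret j =>
        if PySem.List.pyGetD (PySem.List.pyGetD isWater i []) j 0 = 1 then ret ++ [(i, j)]
        else ret) ret) []
  else
    let ret : List (Int × Int) := []
    let ret := if node.1 - 1 ≥ 0 then ret ++ [(node.1 - 1, node.2)] else ret
    let ret := if node.1 + 1 < m then ret ++ [(node.1 + 1, node.2)] else ret
    let ret := if node.2 - 1 ≥ 0 then ret ++ [(node.1, node.2 - 1)] else ret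
    let ret := if node.2 + 1 < n then ret ++ [(node.1, node.2 + 1)] else ret
    ret

-- body of `for neighbor in neighbors(node_tmp): …` for one popped node
def pvProcess (isWater : List (List Int)) (m n h_tmp : Int) (node : Int × Int)
    (q : List (Int × Int)) (hgt : List (List Int)) : List (Int × Int) × List (List Int) :=
  (pvNeighbors isWater m n node).foldl (fun st nb =>
      if pvMget st.2 nb.1 nb.2 = -1 then (st.1 ++ [nb], pvMset st.2 nb.1 nb.2 h_tmp) else st)
    (q, hgt)

-- `for _ in range(len(queue)): node_tmp = queue.pop(0); …`  (the [] branch is a totality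
-- guard only: Python's pop(0) always sees a nonempty queue here, since the counter is the
-- initial queue length and the queue only grows during the level)
def pvLevel (isWater : List (List Int)) (m n h_tmp : Int) :
    Nat → List (Int × Int) → List (List Int) → List (Int × Int) × List (List Int)
  | 0, q, hgt => (q, hgt)
  | k + 1, q, hgt =>
    match q with
    | [] => (q, hgt)
    | node :: rest =>
      let st := pvProcess isWater m n h_tmp node rest hgt
      pvLevel isWater m n h_tmp k st.1 st.2

-- `while queue: … ; h_tmp += 1`, with a fuel counter as totality guard (the loop performs at
-- most max-distance + 2 iterations; the fuel passed below is proved sufficient)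
def pvBfs (isWater : List (List Int)) (m n : Int) :
    Nat → List (Int × Int) → List (List Int) → Int → List (List Int)
  | 0, _, hgt, _ => hgt
  | fuel + 1, q, hgt, h_tmp =>
    if q = [] then hgt
    else
      let st := pvLevel isWater m n h_tmp q.length q hgt
      pvBfs isWater m n fuel st.1 st.2 (h_tmp + 1)

def highestPeak (isWater : List (List Int)) : List (List Int) :=
  let m : Int := PySem.List.len isWater
  let n : Int := PySem.List.len (PySem.List.pyGetD isWater 0 [])
  let height := List.replicate m.toNat (List.replicate n.toNat (-1 : Int))
  pvBfs isWater m n (m.toNat + n.toNat + 2) [(-1, -1)] height 0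

-- ===== PORT B =====
-- abs(i-a) + abs(j-b)
def pvMan (i j a b : Int) : Int := |i - a| + |j - b|

-- [(i, j) for i in range(m) for j in range(n) if isWater[i][j] == 1]
def pvWater (isWater : List (List Int)) (m n : Int) : List (Int × Int) :=
  (PySem.List.pyRange 0 m 1).flatMap (fun i =>
    ((PySem.List.pyRange 0 n 1).filter (fun j =>
        decide (PySem.List.pyGetD (PySem.List.pyGetD isWater i []) j 0 = 1))).map (fun j => (i, j)))

-- min(abs(i-a)+abs(j-b) for a, b in water)  (water nonempty: head w, tail ws)
def pvMinDist (w : Int × Int) (ws : List (Int × Int)) (i j : Int) : Int :=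
  ws.foldl (fun acc p => min acc (pvMan i j p.1 p.2)) (pvMan i j w.1 w.2)

def highestPeak_alt (isWater : List (List Int)) : List (List Int) :=
  let m : Int := PySem.List.len isWater
  let n : Int := PySem.List.len (PySem.List.pyGetD isWater 0 [])
  match pvWater isWater m n with
  | [] => List.replicate m.toNat (List.replicate n.toNat (-1 : Int))
  | w :: ws =>
    (PySem.List.pyRange 0 m 1).map (fun i =>
      (PySem.List.pyRange 0 n 1).map (fun j => pvMinDist w ws i j))

-- ===== PRECONDITION & SPEC =====
-- Pre_ excludes exactly the inputs on which the Python A raises IndexError: the empty grid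
-- (isWater[0]) and grids where some row is shorter than row 0 (isWater[i][j] for j < n).
def Pre_highestPeak (isWater : List (List Int)) : Prop :=
  isWater ≠ [] ∧ ∀ row ∈ isWater, isWater.headI.length ≤ row.length
instance (isWater : List (List Int)) : Decidable (Pre_highestPeak isWater) := by
  unfold Pre_highestPeak; infer_instance

def pvWitness_highestPeak : List (List Int) := [[1, 0], [0, 0]]

def Spec_highestPeak (isWater : List (List Int)) (out : List (List Int)) : Prop := out = highestPeak_alt isWater
instance (isWater : List (List Int)) (out : List (List Int)) : Decidable (Spec_highestPeak isWater out) := by unfold Spec_highestPeak; infer_instance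

-- ===== CLAIM (what is proved, stated in full; the proofs are below) =====
def Claim_equal_highestPeak : Prop := ∀ (isWater : List (List Int)), Dom_highestPeak isWater → Pre_highestPeak isWater → Spec_highestPeak isWater (highestPeak isWater)

-- ===== LEMMAS AND PROOFS =====

-- in-bounds grid cells
def pvInb (m n : Int) (c : Int × Int) : Prop := 0 ≤ c.1 ∧ c.1 < m ∧ 0 ≤ c.2 ∧ c.2 < n

-- 4-adjacency
def pvAdj (c e : Int × Int) : Prop := |c.1 - e.1| + |c.2 - e.2| = 1

-- distance of a cell to the (nonempty) water list
def pvD (w : Int × Int) (ws : List (Int × Int)) (c : Int × Int) : Int := pvMinDist w ws c.1 c.2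

lemma pvMan_nonneg (i j a b : Int) : 0 ≤ pvMan i j a b := by
  have := abs_nonneg (i - a); have := abs_nonneg (j - b); unfold pvMan; omega

lemma pvFoldlMin_le_init (i j : Int) :
    ∀ (ws : List (Int × Int)) (acc : Int),
      ws.foldl (fun a p => min a (pvMan i j p.1 p.2)) acc ≤ acc := by
  intro ws
  induction ws with
  | nil => intro acc; exact le_refl _
  | cons q t ih =>
    intro acc
    exact le_trans (ih (min acc (pvMan i j q.1 q.2))) (min_le_left _ _)

lemma pvFoldlMin_le_mem (i j : Int) :
    ∀ (ws : List (Int × Int)) (acc : Int) (p : Int × Int), p ∈ ws →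
      ws.foldl (fun a p => min a (pvMan i j p.1 p.2)) acc ≤ pvMan i j p.1 p.2 := by
  intro ws
  induction ws with
  | nil => intro acc p hp; cases hp
  | cons q t ih =>
    intro acc p hp
    rcases List.mem_cons.mp hp with h | h
    · subst h
      exact le_trans (pvFoldlMin_le_init i j t _) (min_le_right _ _)
    · exact ih _ p h

lemma pvFoldlMin_cases (i j : Int) :
    ∀ (ws : List (Int × Int)) (acc : Int),
      ws.foldl (fun a p => min a (pvMan i j p.1 p.2)) acc = acc ∨
      ∃ p ∈ ws, ws.foldl (fun a p => min a (pvMan i j p.1 p.2)) acc = pvMan i j p.1 p.2 := by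
  intro ws
  induction ws with
  | nil => intro acc; exact Or.inl rfl
  | cons q t ih =>
    intro acc
    rcases ih (min acc (pvMan i j q.1 q.2)) with h | ⟨p, hp, h⟩
    · rcases min_cases acc (pvMan i j q.1 q.2) with ⟨he, _⟩ | ⟨he, _⟩
      · exact Or.inl (by simpa [he] using h)
      · exact Or.inr ⟨q, List.mem_cons_self .., by simpa [he] using h⟩
    · exact Or.inr ⟨p, List.mem_cons_of_mem _ hp, h⟩

lemma pvMinDist_le (w : Int × Int) (ws : List (Int × Int)) (i j : Int) :
    ∀ p ∈ w :: ws, pvMinDist w ws i j ≤ pvMan i j p.1 p.2 := by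
  intro p hp
  rcases List.mem_cons.mp hp with h | h
  · subst h; exact pvFoldlMin_le_init i j ws _
  · exact pvFoldlMin_le_mem i j ws _ p h

lemma pvMinDist_attained (w : Int × Int) (ws : List (Int × Int)) (i j : Int) :
    ∃ p ∈ w :: ws, pvMinDist w ws i j = pvMan i j p.1 p.2 := by
  rcases pvFoldlMin_cases i j ws (pvMan i j w.1 w.2) with h | ⟨p, hp, h⟩
  · exact ⟨w, List.mem_cons_self .., h⟩
  · exact ⟨p, List.mem_cons_of_mem _ hp, h⟩

lemma pvD_nonneg (w : Int × Int) (ws : List (Int × Int)) (c : Int × Int) :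
    0 ≤ pvD w ws c := by
  obtain ⟨p, _, hp⟩ := pvMinDist_attained w ws c.1 c.2
  have := pvMan_nonneg c.1 c.2 p.1 p.2
  unfold pvD; omega

lemma pvAdj_symm {c e : Int × Int} (h : pvAdj c e) : pvAdj e c := by
  simp only [pvAdj, Int.abs_eq_natAbs] at *; omega

lemma pvD_adj_le (w : Int × Int) (ws : List (Int × Int)) {c e : Int × Int} (h : pvAdj c e) :
    pvD w ws e ≤ pvD w ws c + 1 := by
  obtain ⟨p, hp, hval⟩ := pvMinDist_attained w ws c.1 c.2
  have hle := pvMinDist_le w ws e.1 e.2 p hp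
  simp only [pvD, pvAdj, pvMan, Int.abs_eq_natAbs] at *; omega

lemma pvD_descent (m n : Int) (w : Int × Int) (ws : List (Int × Int))
    (HW : ∀ p ∈ w :: ws, pvInb m n p) {c : Int × Int} (hc : pvInb m n c)
    (h1 : 1 ≤ pvD w ws c) :
    ∃ e, pvAdj c e ∧ pvInb m n e ∧ pvD w ws e + 1 = pvD w ws c := by
  obtain ⟨p, hp, hval⟩ := pvMinDist_attained w ws c.1 c.2
  have hpin := HW p hp
  obtain ⟨x, y⟩ := c
  obtain ⟨a, b⟩ := p
  simp only [pvInb] at hc hpin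
  have key : ∀ e : Int × Int, pvAdj (x, y) e → pvInb m n e →
      pvMan e.1 e.2 a b + 1 = pvMan x y a b →
      ∃ e', pvAdj (x, y) e' ∧ pvInb m n e' ∧ pvD w ws e' + 1 = pvD w ws (x, y) := by
    intro e hadj hinb hman
    have h2 : pvMinDist w ws e.1 e.2 ≤ pvMan e.1 e.2 a b :=
      pvMinDist_le w ws e.1 e.2 (a, b) hp
    have h3 : pvD w ws (x, y) ≤ pvD w ws e + 1 := pvD_adj_le w ws (pvAdj_symm hadj)
    refine ⟨e, hadj, hinb, ?_⟩
    simp only [pvD] at *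
    omega
  have habs : 1 ≤ pvMan x y a b := by
    simp only [pvD] at h1
    dsimp only at h1 hval
    omega
  simp only [pvMan, Int.abs_eq_natAbs] at habs
  by_cases hxa : x < a
  · exact key (x + 1, y) (by simp only [pvAdj, Int.abs_eq_natAbs]; omega)
      (by simp only [pvInb]; omega) (by simp only [pvMan, Int.abs_eq_natAbs]; omega)
  · by_cases hax : a < x
    · exact key (x - 1, y) (by simp only [pvAdj, Int.abs_eq_natAbs]; omega)
        (by simp only [pvInb]; omega) (by simp only [pvMan, Int.abs_eq_natAbs]; omega)
    · by_cases hyb : y < b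
      · exact key (x, y + 1) (by simp only [pvAdj, Int.abs_eq_natAbs]; omega)
          (by simp only [pvInb]; omega) (by simp only [pvMan, Int.abs_eq_natAbs]; omega)
      · exact key (x, y - 1) (by simp only [pvAdj, Int.abs_eq_natAbs]; omega)
          (by simp only [pvInb]; omega) (by simp only [pvMan, Int.abs_eq_natAbs]; omega)

-- if some in-bounds cell has distance ≥ h ≥ 0, some in-bounds cell has distance exactly h
lemma pvD_reach (m n : Int) (w : Int × Int) (ws : List (Int × Int))
    (HW : ∀ p ∈ w :: ws, pvInb m n p) (h : Int) (hh : 0 ≤ h) :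
    ∀ x, pvInb m n x → h ≤ pvD w ws x → ∃ e, pvInb m n e ∧ pvD w ws e = h := by
  intro x hx hge
  obtain ⟨k, hk⟩ : ∃ k : Nat, pvD w ws x = h + k := ⟨(pvD w ws x - h).toNat, by omega⟩
  clear hge
  induction k generalizing x with
  | zero => exact ⟨x, hx, by omega⟩
  | succ k ih =>
    obtain ⟨e, _, hein, heq⟩ := pvD_descent m n w ws HW hx (by omega)
    exact ih e hein (by omega)

-- hgt is an m×n matrix whose in-bounds entries are f
def pvRepM (m n : Int) (hgt : List (List Int)) (f : Int × Int → Int) : Prop :=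
  hgt.length = m.toNat ∧ (∀ r ∈ hgt, r.length = n.toNat) ∧
  ∀ c : Int × Int, pvInb m n c → pvMget hgt c.1 c.2 = f c

lemma pvRepM_congr {m n : Int} {hgt : List (List Int)} {f g : Int × Int → Int}
    (h : pvRepM m n hgt f) (hfg : ∀ c, pvInb m n c → f c = g c) : pvRepM m n hgt g := by
  exact ⟨h.1, h.2.1, fun c hc => (h.2.2 c hc).trans (hfg c hc)⟩

lemma pvRepM_init (m n : Int) :
    pvRepM m n (List.replicate m.toNat (List.replicate n.toNat (-1 : Int))) (fun _ => -1) := by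
  refine ⟨by simp, ?_, ?_⟩
  · intro r hr
    rw [List.eq_of_mem_replicate hr]
    simp
  · intro c hc
    obtain ⟨h1, h2, h3, h4⟩ := hc
    rw [pvMget, PySem.List.pyGetD_eq_getElem _ _ h1 (by simp; omega),
      List.getElem_replicate, PySem.List.pyGetD_eq_getElem _ _ h3 (by simp; omega),
      List.getElem_replicate]

lemma pvRepM_set {m n : Int} {hgt : List (List Int)} {f : Int × Int → Int}
    (h : pvRepM m n hgt f) {c : Int × Int} (hc : pvInb m n c) (v : Int) :
    pvRepM m n (pvMset hgt c.1 c.2 v) (fun e => if e = c then v else f e) := by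
  obtain ⟨hlen, hrows, hget⟩ := h
  obtain ⟨h1, h2, h3, h4⟩ := hc
  have hx : c.1.toNat < hgt.length := by omega
  have hrow : PySem.List.pyGetD hgt c.1 [] = hgt[c.1.toNat] :=
    PySem.List.pyGetD_eq_getElem _ _ h1 (by omega)
  have hrlen : hgt[c.1.toNat].length = n.toNat := hrows _ (List.getElem_mem hx)
  have hmset : pvMset hgt c.1 c.2 v = hgt.set c.1.toNat (hgt[c.1.toNat].set c.2.toNat v) := by
    rw [pvMset, hrow, PySem.List.pySetD_of_nonneg _ _ h3, PySem.List.pySetD_of_nonneg _ _ h1]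
  rw [hmset]
  refine ⟨by simpa using hlen, ?_, ?_⟩
  · intro r hr
    obtain ⟨i, hi, hie⟩ := List.mem_iff_getElem.mp hr
    rw [List.getElem_set] at hie
    by_cases hic : c.1.toNat = i
    · rw [if_pos hic] at hie
      rw [← hie]
      simpa using hrlen
    · rw [if_neg hic] at hie
      rw [← hie]
      exact hrows _ (List.getElem_mem _)
  · intro e he
    obtain ⟨g1, g2, g3, g4⟩ := he
    have hgetE := hget e ⟨g1, g2, g3, g4⟩
    beta_reduce
    rw [pvMget] at hgetE ⊢
    rw [PySem.List.pyGetD_eq_getElem _ _ g1 (by simp; omega), List.getElem_set]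
    rw [PySem.List.pyGetD_eq_getElem _ _ g1 (by omega)] at hgetE
    by_cases hie : c.1.toNat = e.1.toNat
    · rw [if_pos hie]
      simp only [hie]
      have hrlen2 : (hgt[e.1.toNat].set c.2.toNat v).length = n.toNat := by
        rw [List.length_set, hrows hgt[e.1.toNat] (List.getElem_mem (by omega))]
      rw [PySem.List.pyGetD_eq_getElem _ _ g3 (by rw [hrlen2]; omega), List.getElem_set]
      rw [PySem.List.pyGetD_eq_getElem _ _ g3
        (by rw [hrows hgt[e.1.toNat] (List.getElem_mem (by omega))]; omega)] at hgetE
      have he1 : e.1 = c.1 := by omega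
      by_cases hje : c.2.toNat = e.2.toNat
      · have he2 : e.2 = c.2 := by omega
        have hec : e = c := Prod.ext he1 he2
        rw [if_pos hje, if_pos hec]
      · have hec : e ≠ c := by
          intro hec
          exact hje (by rw [hec])
        rw [if_neg hje, if_neg hec]
        exact hgetE
    · have hec : e ≠ c := by
        intro hec
        exact hie (by rw [hec])
      rw [if_neg hie, if_neg hec]
      exact hgetE

lemma pvRepM_eq_map {m n : Int} (hm : 0 ≤ m) (hn : 0 ≤ n) {hgt : List (List Int)}
    {f : Int × Int → Int} (h : pvRepM m n hgt f) :
    hgt = (PySem.List.pyRange 0 m 1).map (fun i =>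
      (PySem.List.pyRange 0 n 1).map (fun j => f (i, j))) := by
  obtain ⟨hlen, hrows, hget⟩ := h
  apply List.ext_getElem
  · simp [PySem.List.length_pyRange_one, hlen]
  · intro i hi1 hi2
    have him : i < m.toNat := by rwa [hlen] at hi1
    rw [List.getElem_map, PySem.List.getElem_pyRange_one, zero_add]
    apply List.ext_getElem
    · rw [hrows _ (List.getElem_mem hi1)]
      simp [PySem.List.length_pyRange_one]
    · intro j hj1 hj2
      have hjn : j < n.toNat := by rwa [hrows _ (List.getElem_mem hi1)] at hj1
      rw [List.getElem_map, PySem.List.getElem_pyRange_one, zero_add]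
      have hinb : pvInb m n ((i : Int), (j : Int)) := ⟨by omega, by omega, by omega, by omega⟩
      have hval := hget _ hinb
      rw [pvMget] at hval
      dsimp only at hval
      rw [PySem.List.pyGetD_eq_getElem hgt [] (by omega) (by omega)] at hval
      rw [PySem.List.pyGetD_eq_getElem _ 0 (by omega)
        (by rw [hrows _ (List.getElem_mem (by omega))]; omega)] at hval
      exact hval

-- processing one list of candidate cells (the inner `for neighbor in …` loop)
lemma pvFoldStep (m n : Int) (w : Int × Int) (ws : List (Int × Int)) (h : Int)
    (L : List (Int × Int)) :
    ∀ (q0 new : List (Int × Int)) (hgt : List (List Int)),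
    (∀ nb ∈ L, pvInb m n nb ∧ pvD w ws nb ≤ h + 1) →
    (∀ x ∈ new, pvInb m n x ∧ pvD w ws x = h + 1) →
    pvRepM m n hgt (fun x => if pvD w ws x ≤ h then pvD w ws x else if x ∈ new then h + 1 else -1) →
    ∃ new2 hgt2,
      L.foldl (fun st nb =>
          if pvMget st.2 nb.1 nb.2 = -1 then (st.1 ++ [nb], pvMset st.2 nb.1 nb.2 (h + 1)) else st)
        (q0 ++ new, hgt) = (q0 ++ new2, hgt2) ∧
      (∀ x ∈ new2, pvInb m n x ∧ pvD w ws x = h + 1) ∧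
      pvRepM m n hgt2 (fun x => if pvD w ws x ≤ h then pvD w ws x else if x ∈ new2 then h + 1 else -1) ∧
      (∀ x ∈ new, x ∈ new2) ∧
      (∀ nb ∈ L, pvD w ws nb = h + 1 → nb ∈ new2) := by
  induction L with
  | nil =>
    intro q0 new hgt hL hnew hrep
    exact ⟨new, hgt, rfl, hnew, hrep, fun x hx => hx, fun nb hnb => absurd hnb (List.not_mem_nil)⟩
  | cons nb L ih =>
    intro q0 new hgt hL hnew hrep
    obtain ⟨hnb, hnbD⟩ := hL nb (List.mem_cons_self ..)
    have hval : pvMget hgt nb.1 nb.2 =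
        (if pvD w ws nb ≤ h then pvD w ws nb else if nb ∈ new then h + 1 else -1) :=
      hrep.2.2 nb hnb
    simp only [List.foldl_cons]
    by_cases hle : pvD w ws nb ≤ h
    · have hne : ¬ (pvMget hgt nb.1 nb.2 = -1) := by
        rw [hval, if_pos hle]
        have := pvD_nonneg w ws nb
        omega
      rw [if_neg hne]
      obtain ⟨new2, hgt2, hfold, p1, p2, p3, p4⟩ :=
        ih q0 new hgt (fun x hx => hL x (List.mem_cons_of_mem _ hx)) hnew hrep
      refine ⟨new2, hgt2, hfold, p1, p2, p3, ?_⟩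
      intro x hx hDx
      rcases List.mem_cons.mp hx with hx | hx
      · subst hx
        omega
      · exact p4 x hx hDx
    · by_cases hmem : nb ∈ new
      · have hne : ¬ (pvMget hgt nb.1 nb.2 = -1) := by
          rw [hval, if_neg hle, if_pos hmem]
          obtain ⟨_, hDnb⟩ := hnew nb hmem
          have := pvD_nonneg w ws nb
          omega
        rw [if_neg hne]
        obtain ⟨new2, hgt2, hfold, p1, p2, p3, p4⟩ :=
          ih q0 new hgt (fun x hx => hL x (List.mem_cons_of_mem _ hx)) hnew hrep
        refine ⟨new2, hgt2, hfold, p1, p2, p3, ?_⟩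
        intro x hx hDx
        rcases List.mem_cons.mp hx with hx | hx
        · subst hx
          exact p3 x hmem
        · exact p4 x hx hDx
      · have hD : pvD w ws nb = h + 1 := by omega
        have heq : pvMget hgt nb.1 nb.2 = -1 := by rw [hval, if_neg hle, if_neg hmem]
        rw [if_pos heq]
        have hrep2 := pvRepM_set hrep hnb (h + 1)
        have hrep3 : pvRepM m n (pvMset hgt nb.1 nb.2 (h + 1))
            (fun x => if pvD w ws x ≤ h then pvD w ws x
                      else if x ∈ new ++ [nb] then h + 1 else -1) := by
          refine pvRepM_congr hrep2 ?_
          intro e he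
          by_cases hce : e = nb
          · subst hce
            rw [if_pos rfl, if_neg hle, if_pos (by simp)]
          · rw [if_neg hce]
            by_cases hde : pvD w ws e ≤ h
            · rw [if_pos hde, if_pos hde]
            · rw [if_neg hde, if_neg hde]
              by_cases hme : e ∈ new
              · rw [if_pos hme, if_pos (by simp [hme])]
              · rw [if_neg hme, if_neg (by simp [hme, hce])]
        have hnew2 : ∀ x ∈ new ++ [nb], pvInb m n x ∧ pvD w ws x = h + 1 := by
          intro x hx
          rcases List.mem_append.mp hx with hx | hx
          · exact hnew x hx
          · rw [List.mem_singleton.mp hx]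
            exact ⟨hnb, hD⟩
        obtain ⟨new2, hgt2, hfold, p1, p2, p3, p4⟩ :=
          ih q0 (new ++ [nb]) (pvMset hgt nb.1 nb.2 (h + 1))
            (fun x hx => hL x (List.mem_cons_of_mem _ hx)) hnew2 hrep3
        refine ⟨new2, hgt2, ?_, p1, p2, ?_, ?_⟩
        · rw [← hfold, List.append_assoc]
        · intro x hx
          exact p3 x (List.mem_append.mpr (Or.inl hx))
        · intro x hx hDx
          rcases List.mem_cons.mp hx with hx | hx
          · subst hx
            exact p3 x (List.mem_append.mpr (Or.inr (List.mem_singleton.mpr rfl)))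
          · exact p4 x hx hDx

lemma pvNeighbors_mem (isWater : List (List Int)) (m n : Int) {c : Int × Int}
    (hc : pvInb m n c) :
    ∀ nb, nb ∈ pvNeighbors isWater m n c ↔ (pvAdj c nb ∧ pvInb m n nb) := by
  intro nb
  have hne : c ≠ (-1, -1) := by
    obtain ⟨h1, _, _, _⟩ := hc
    intro hce
    rw [hce] at h1
    norm_num at h1
  obtain ⟨h1, h2, h3, h4⟩ := hc
  obtain ⟨x, y⟩ := c
  obtain ⟨u, v⟩ := nb
  simp only [pvNeighbors, if_neg hne]
  split_ifs <;>
    (simp only [List.mem_append, List.mem_singleton, List.not_mem_nil, List.nil_append,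
       false_iff, Prod.mk.injEq, pvAdj, pvInb, Int.abs_eq_natAbs] at *; omega)

lemma pvLevel_spec (isWater : List (List Int)) (m n : Int) (w : Int × Int)
    (ws : List (Int × Int)) (h : Int) :
    ∀ (rest new : List (Int × Int)) (hgt : List (List Int)),
    (∀ c ∈ rest, pvInb m n c ∧ pvD w ws c = h) →
    (∀ x ∈ new, pvInb m n x ∧ pvD w ws x = h + 1) →
    pvRepM m n hgt (fun x => if pvD w ws x ≤ h then pvD w ws x else if x ∈ new then h + 1 else -1) →
    (∀ x, pvInb m n x → pvD w ws x = h + 1 →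
      (∃ e, pvAdj e x ∧ pvInb m n e ∧ pvD w ws e = h ∧ e ∉ rest) → x ∈ new) →
    ∃ new2 hgt2,
      pvLevel isWater m n (h + 1) rest.length (rest ++ new) hgt = (new2, hgt2) ∧
      (∀ x ∈ new2, pvInb m n x ∧ pvD w ws x = h + 1) ∧
      pvRepM m n hgt2 (fun x => if pvD w ws x ≤ h then pvD w ws x else if x ∈ new2 then h + 1 else -1) ∧
      (∀ x, pvInb m n x → pvD w ws x = h + 1 →
        (∃ e, pvAdj e x ∧ pvInb m n e ∧ pvD w ws e = h) → x ∈ new2) := by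
  intro rest
  induction rest with
  | nil =>
    intro new hgt hrest hnew hrep hcov
    refine ⟨new, hgt, by simp [pvLevel], hnew, hrep, ?_⟩
    rintro x hx hD ⟨e, he1, he2, he3⟩
    exact hcov x hx hD ⟨e, he1, he2, he3, by simp⟩
  | cons c rest ih =>
    intro new hgt hrest hnew hrep hcov
    obtain ⟨hcin, hcD⟩ := hrest c (List.mem_cons_self ..)
    have hlen : (c :: rest).length = rest.length + 1 := rfl
    rw [hlen, List.cons_append]
    simp only [pvLevel]
    have hnbs := pvNeighbors_mem isWater m n hcin
    obtain ⟨new2, hgt2, hfold, q1, q2, q3, q4⟩ :=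
      pvFoldStep m n w ws h (pvNeighbors isWater m n c) rest new hgt
        (fun nb hnb => ⟨((hnbs nb).1 hnb).2, by
          have := pvD_adj_le w ws ((hnbs nb).1 hnb).1
          omega⟩)
        hnew hrep
    rw [pvProcess, hfold]
    refine ih new2 hgt2 (fun x hx => hrest x (List.mem_cons_of_mem _ hx)) q1 q2 ?_
    rintro x hx hD ⟨e, he1, he2, he3, he4⟩
    by_cases hec : e = c
    · subst hec
      exact q4 x ((hnbs x).2 ⟨he1, hx⟩) hD
    · refine q3 x (hcov x hx hD ⟨e, he1, he2, he3, ?_⟩)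
      simp [hec, he4]

lemma pvBfs_spec (isWater : List (List Int)) (m n : Int) (w : Int × Int)
    (ws : List (Int × Int)) (HW : ∀ p ∈ w :: ws, pvInb m n p) :
    ∀ (fuel : Nat) (h : Int) (q : List (Int × Int)) (hgt : List (List Int)), 0 ≤ h →
    (∀ c, c ∈ q ↔ pvInb m n c ∧ pvD w ws c = h) →
    pvRepM m n hgt (fun x => if pvD w ws x ≤ h then pvD w ws x else -1) →
    (∀ c, pvInb m n c → pvD w ws c < h + fuel) →
    pvRepM m n (pvBfs isWater m n fuel q hgt (h + 1)) (fun x => pvD w ws x) := by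
  intro fuel
  induction fuel with
  | zero =>
    intro h q hgt hh hq hrep hbound
    simp only [pvBfs]
    refine pvRepM_congr hrep fun c hc => ?_
    have := hbound c hc
    rw [if_pos (by omega)]
  | succ fuel ih =>
    intro h q hgt hh hq hrep hbound
    by_cases hqe : q = []
    · subst hqe
      simp only [pvBfs, if_pos]
      refine pvRepM_congr hrep fun c hc => ?_
      have hcle : pvD w ws c ≤ h := by
        by_contra hgt2
        obtain ⟨e, hein, heD⟩ := pvD_reach m n w ws HW h hh c hc (by omega)
        have := (hq e).2 ⟨hein, heD⟩
        simp at this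
      rw [if_pos hcle]
    · simp only [pvBfs, if_neg hqe]
      obtain ⟨new2, hgt2, hlev, p1, p2, p3⟩ :=
        pvLevel_spec isWater m n w ws h q [] hgt
          (fun c hc => (hq c).1 hc) (by simp)
          (pvRepM_congr hrep (by
            intro c hc
            by_cases hD : pvD w ws c ≤ h
            · rw [if_pos hD, if_pos hD]
            · rw [if_neg hD, if_neg hD]
              simp))
          (by
            rintro x hx hD ⟨e, he1, he2, he3, he4⟩
            exact absurd ((hq e).2 ⟨he2, he3⟩) he4)
      rw [List.append_nil] at hlev
      rw [hlev]
      have hchar : ∀ c, c ∈ new2 ↔ pvInb m n c ∧ pvD w ws c = h + 1 := by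
        intro c
        constructor
        · exact p1 c
        · rintro ⟨hc, hD⟩
          obtain ⟨e, g1, g2, g3⟩ := pvD_descent m n w ws HW hc (by omega)
          exact p3 c hc hD ⟨e, pvAdj_symm g1, g2, by omega⟩
      refine ih (h + 1) new2 hgt2 (by omega) hchar ?_ ?_
      · refine pvRepM_congr p2 fun c hc => ?_
        by_cases g1 : pvD w ws c ≤ h
        · rw [if_pos g1, if_pos (by omega)]
        · by_cases g2 : pvD w ws c = h + 1
          · rw [if_neg g1, if_pos ((hchar c).2 ⟨hc, g2⟩), if_pos (by omega), g2]
          · rw [if_neg g1, if_neg (fun hm => g2 (((hchar c).1 hm).2)), if_neg (by omega)]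
      · intro c hc
        have := hbound c hc
        omega

lemma pvNeighbors_sentinel (isWater : List (List Int)) (m n : Int) :
    pvNeighbors isWater m n (-1, -1) = pvWater isWater m n := by
  unfold pvNeighbors pvWater
  rw [if_pos rfl]
  simp only [PySem.List.foldl_append_ite, PySem.List.foldl_append_eq_flatMap, List.nil_append]

lemma pvWater_inb (isWater : List (List Int)) (m n : Int) :
    ∀ p ∈ pvWater isWater m n, pvInb m n p := by
  intro p hp
  simp only [pvWater, List.mem_flatMap, List.mem_map, List.mem_filter,
    PySem.List.mem_pyRange_one] at hp
  obtain ⟨i, hi, j, ⟨hj, _⟩, rfl⟩ := hp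
  exact ⟨hi.1, hi.2, hj.1, hj.2⟩

-- the distance-0 cells are exactly the water cells
lemma pvD_zero_iff (m n : Int) (w : Int × Int) (ws : List (Int × Int))
    (HW : ∀ p ∈ w :: ws, pvInb m n p) (x : Int × Int) :
    (pvInb m n x ∧ pvD w ws x = 0) ↔ x ∈ w :: ws := by
  constructor
  · rintro ⟨hinb, hD⟩
    obtain ⟨p, hp, hval⟩ := pvMinDist_attained w ws x.1 x.2
    have hman : pvMan x.1 x.2 p.1 p.2 = 0 := by
      simp only [pvD] at hD
      omega
    have hx : x = p := by
      obtain ⟨a, b⟩ := x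
      obtain ⟨a2, b2⟩ := p
      simp only [pvMan, Int.abs_eq_natAbs] at hman
      simp only [Prod.mk.injEq]
      omega
    rw [hx]
    exact hp
  · intro hx
    refine ⟨HW x hx, ?_⟩
    have hle := pvMinDist_le w ws x.1 x.2 x hx
    have hge := pvD_nonneg w ws x
    have hself : pvMan x.1 x.2 x.1 x.2 = 0 := by simp [pvMan]
    simp only [pvD] at *
    omega

-- ===== VERDICT (by name: the statement is the Claim_ definition above) =====
theorem highestPeak_spec : Claim_equal_highestPeak := by
  intro isWater _hdom _hpre
  unfold Spec_highestPeak highestPeak highestPeak_alt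
  dsimp only
  set M : Int := PySem.List.len isWater with hMdef
  set N : Int := PySem.List.len (PySem.List.pyGetD isWater 0 []) with hNdef
  have hm0 : 0 ≤ M := by rw [hMdef, PySem.List.len_eq]; exact Int.natCast_nonneg _
  have hn0 : 0 ≤ N := by rw [hNdef, PySem.List.len_eq]; exact Int.natCast_nonneg _
  rcases hW : pvWater isWater M N with _ | ⟨w, ws⟩
  · have hproc : pvProcess isWater M N 0 (-1, -1) []
        (List.replicate M.toNat (List.replicate N.toNat (-1 : Int))) =
        ([], List.replicate M.toNat (List.replicate N.toNat (-1 : Int))) := by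
      rw [pvProcess, pvNeighbors_sentinel, hW]
      rfl
    calc pvBfs isWater M N (M.toNat + N.toNat + 2) [(-1, -1)]
          (List.replicate M.toNat (List.replicate N.toNat (-1 : Int))) 0
        = pvBfs isWater M N (M.toNat + N.toNat + 1)
            (pvProcess isWater M N 0 (-1, -1) []
              (List.replicate M.toNat (List.replicate N.toNat (-1 : Int)))).1
            (pvProcess isWater M N 0 (-1, -1) []
              (List.replicate M.toNat (List.replicate N.toNat (-1 : Int)))).2
            (0 + 1) := rfl
      _ = List.replicate M.toNat (List.replicate N.toNat (-1 : Int)) := by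
          rw [hproc]
          rfl
  · have HW : ∀ p ∈ w :: ws, pvInb M N p := by
      intro p hp
      exact pvWater_inb isWater M N p (by rw [hW]; exact hp)
    obtain ⟨new2, hgt2, hfold, p1, p2, p3, p4⟩ :=
      pvFoldStep M N w ws (-1) (w :: ws) [] []
        (List.replicate M.toNat (List.replicate N.toNat (-1 : Int)))
        (fun nb hnb => ⟨HW nb hnb, by
          have h1 := pvMinDist_le w ws nb.1 nb.2 nb hnb
          have h2 : pvMan nb.1 nb.2 nb.1 nb.2 = 0 := by simp [pvMan]
          simp only [pvD]
          omega⟩)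
        (by simp)
        (pvRepM_congr (pvRepM_init M N) (by
          intro c hc
          have := pvD_nonneg w ws c
          rw [if_neg (by omega), if_neg (by simp)]))
    simp only [List.nil_append, neg_add_cancel] at hfold p1 p2 p4
    have hproc : pvProcess isWater M N 0 (-1, -1) []
        (List.replicate M.toNat (List.replicate N.toNat (-1 : Int))) = (new2, hgt2) := by
      rw [pvProcess, pvNeighbors_sentinel, hW]
      exact hfold
    have hchar : ∀ c, c ∈ new2 ↔ pvInb M N c ∧ pvD w ws c = 0 := by
      intro c
      constructor
      · exact p1 c
      · intro hc
        exact p4 c ((pvD_zero_iff M N w ws HW c).1 hc) hc.2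
    have hrep2 : pvRepM M N hgt2 (fun x => if pvD w ws x ≤ 0 then pvD w ws x else -1) := by
      refine pvRepM_congr p2 fun c hc => ?_
      have h0 := pvD_nonneg w ws c
      by_cases h1 : pvD w ws c = 0
      · rw [if_neg (by omega), if_pos ((hchar c).2 ⟨hc, h1⟩), if_pos (by omega), h1]
      · rw [if_neg (by omega), if_neg (fun hm => h1 ((hchar c).1 hm).2), if_neg (by omega)]
    have hbound : ∀ c, pvInb M N c →
        pvD w ws c < 0 + ((M.toNat + N.toNat + 1 : Nat) : Int) := by
      intro c hc
      have h1 := pvMinDist_le w ws c.1 c.2 w (List.mem_cons_self ..)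
      have h2 := HW w (List.mem_cons_self ..)
      obtain ⟨a1, a2, a3, a4⟩ := hc
      obtain ⟨b1, b2, b3, b4⟩ := h2
      simp only [pvD, pvMan, Int.abs_eq_natAbs] at h1 ⊢
      omega
    have hfinal := pvBfs_spec isWater M N w ws HW (M.toNat + N.toNat + 1) 0 new2 hgt2
      (le_refl 0) hchar hrep2 hbound
    calc pvBfs isWater M N (M.toNat + N.toNat + 2) [(-1, -1)]
          (List.replicate M.toNat (List.replicate N.toNat (-1 : Int))) 0
        = pvBfs isWater M N (M.toNat + N.toNat + 1)
            (pvProcess isWater M N 0 (-1, -1) []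
              (List.replicate M.toNat (List.replicate N.toNat (-1 : Int)))).1
            (pvProcess isWater M N 0 (-1, -1) []
              (List.replicate M.toNat (List.replicate N.toNat (-1 : Int)))).2
            (0 + 1) := rfl
      _ = pvBfs isWater M N (M.toNat + N.toNat + 1) new2 hgt2 (0 + 1) := by rw [hproc]
      _ = (PySem.List.pyRange 0 M 1).map (fun i =>
            (PySem.List.pyRange 0 N 1).map (fun j => pvMinDist w ws i j)) := by
          have := pvRepM_eq_map hm0 hn0 hfinal
          rw [this]
          simp only [pvD]
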